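-- pv_equiv track=rewrite | github.com/weechat/scripts | python/autosort.py | on_info_escape
-- ===== SOURCE A (Python) =====
-- def on_info_escape(pointer, name, arguments):
-- 	result = ''
-- 	for c in arguments:
-- 		if c == '\\':
-- 			result += '\\\\'
-- 		elif c == ',':
-- 			result += '\\,'
-- 		else:
-- 			result +=c
-- 	return result
-- ===== SOURCE B (Python) =====
-- def on_info_escape(pointer, name, arguments):
-- 	return arguments.replace('\\', '\\\\').replace(',', '\\,')
-- ===== Notes on version B (the rewrite author's own statement) =====
-- stated objective: idiomatic
-- what changed: Replaces the per-character accumulator loop with two whole-string str.replace passes (double backslashes first, then escape commas).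
import Mathlib
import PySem

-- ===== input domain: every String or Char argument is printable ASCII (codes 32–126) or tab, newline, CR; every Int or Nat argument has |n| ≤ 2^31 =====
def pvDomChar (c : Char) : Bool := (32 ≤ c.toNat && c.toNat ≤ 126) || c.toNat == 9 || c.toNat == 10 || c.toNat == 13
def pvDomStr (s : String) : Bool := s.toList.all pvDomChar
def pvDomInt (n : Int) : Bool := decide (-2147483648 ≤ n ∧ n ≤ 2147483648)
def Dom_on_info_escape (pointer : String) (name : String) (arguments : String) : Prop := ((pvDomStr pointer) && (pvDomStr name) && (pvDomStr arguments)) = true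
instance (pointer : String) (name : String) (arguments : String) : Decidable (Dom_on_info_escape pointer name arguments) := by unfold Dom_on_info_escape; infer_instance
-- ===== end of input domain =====

-- B replaces A's per-character accumulator loop with two whole-string replace passes (idiomatic; not faster).

-- ===== PORT A =====
-- per-character loop: result = ''; for c in arguments: … result += …
def on_info_escape (pointer : String) (name : String) (arguments : String) : String :=
  arguments.toList.foldl
    (fun result c =>
      if c == '\\' then result ++ "\\\\"
      else if c == ',' then result ++ "\\,"
      else result ++ String.ofList [c]) ""

-- ===== PORT B =====
-- two str.replace passes: double every backslash, then escape every comma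
def on_info_escape_alt (pointer : String) (name : String) (arguments : String) : String :=
  PySem.Str.replace (PySem.Str.replace arguments "\\" "\\\\") "," "\\,"

-- ===== PRECONDITION & SPEC =====
def Spec_on_info_escape (pointer : String) (name : String) (arguments : String) (out : String) : Prop := out = on_info_escape_alt pointer name arguments
instance (pointer : String) (name : String) (arguments : String) (out : String) : Decidable (Spec_on_info_escape pointer name arguments out) := by unfold Spec_on_info_escape; infer_instance

-- ===== CLAIM (what is proved, stated in full; the proofs are below) =====
def Claim_equal_on_info_escape : Prop := ∀ (pointer : String) (name : String) (arguments : String), Dom_on_info_escape pointer name arguments → Spec_on_info_escape pointer name arguments (on_info_escape pointer name arguments)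

-- ===== LEMMAS AND PROOFS =====

-- replace with a single-character pattern is a flatMap over the characters
theorem replace_go_single (o : Char) (new : List Char) :
    ∀ (fuel : Nat) (l acc : List Char), l.length ≤ fuel →
      PySem.Chars.replace.go [o] new fuel l acc
        = acc.reverse ++ l.flatMap (fun c => if c = o then new else [c]) := by
  intro fuel
  induction fuel with
  | zero =>
    intro l acc h
    have : l = [] := List.eq_nil_of_length_eq_zero (Nat.le_zero.mp h)
    subst this
    simp [PySem.Chars.replace.go]
  | succ n ih =>
    intro l acc h
    cases l with
    | nil => simp [PySem.Chars.replace.go]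
    | cons c t =>
      simp only [PySem.Chars.replace.go]
      by_cases hc : c = o
      · subst hc
        have hp : List.isPrefixOf [c] (c :: t) = true := by
          simp [List.isPrefixOf]
        simp only [hp, if_true, List.length_cons, List.length_nil, List.drop_succ_cons,
          List.drop_zero]
        rw [ih t (new.reverse ++ acc) (by simpa using Nat.le_of_succ_le_succ h)]
        simp [List.flatMap_cons]
      · have hp : List.isPrefixOf [o] (c :: t) = false := by
          simp only [List.isPrefixOf, Bool.and_eq_false_iff, beq_eq_false_iff_ne, ne_eq]
          exact Or.inl (fun h' => hc h'.symm)
        simp only [hp, Bool.false_eq_true, if_false]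
        rw [ih t (c :: acc) (by simpa using Nat.le_of_succ_le_succ h)]
        simp [List.flatMap_cons, hc]

theorem replace_single (s : List Char) (o : Char) (new : List Char) :
    PySem.Chars.replace s [o] new = s.flatMap (fun c => if c = o then new else [c]) := by
  simp only [PySem.Chars.replace, List.isEmpty]
  exact replace_go_single o new s.length s [] le_rfl

-- A's loop as a flatMap
theorem loop_eq_flatMap (l : List Char) :
    ∀ acc : String,
      l.foldl (fun result c =>
        if c == '\\' then result ++ "\\\\"
        else if c == ',' then result ++ "\\,"
        else result ++ String.ofList [c]) acc
      = acc ++ String.ofList (l.flatMap (fun c =>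
          if c = '\\' then ['\\', '\\'] else if c = ',' then ['\\', ','] else [c])) := by
  induction l with
  | nil =>
    intro acc
    apply String.toList_injective
    simp
  | cons c t ih =>
    intro acc
    simp only [List.foldl_cons, List.flatMap_cons]
    by_cases h1 : c = '\\'
    · subst h1
      rw [if_pos (show (('\\' : Char) == '\\') = true from rfl), ih, String.append_assoc,
        show ("\\\\" : String) = String.ofList ['\\', '\\'] from rfl,
        ← String.ofList_append, if_pos rfl]
    · rw [if_neg (by simpa using h1), if_neg h1]
      by_cases h2 : c = ','
      · subst h2
        rw [if_pos (show ((',' : Char) == ',') = true from rfl), ih, String.append_assoc,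
          show ("\\," : String) = String.ofList ['\\', ','] from rfl,
          ← String.ofList_append, if_pos rfl]
      · rw [if_neg (by simpa using h2), if_neg h2, ih, String.append_assoc,
          ← String.ofList_append]

-- ===== VERDICT (by name: the statement is the Claim_ definition above) =====
theorem on_info_escape_spec : Claim_equal_on_info_escape := by
  intro pointer name arguments _
  unfold Spec_on_info_escape on_info_escape on_info_escape_alt
  rw [loop_eq_flatMap]
  simp only [PySem.Str.replace, String.toList_ofList]
  rw [show ("\\" : String).toList = ['\\'] from rfl,
      show ("," : String).toList = [','] from rfl,
      show ("\\\\" : String).toList = ['\\','\\'] from rfl,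
      show ("\\," : String).toList = ['\\',','] from rfl]
  rw [replace_single, replace_single, List.flatMap_assoc]
  have hfun : (fun c => if c = '\\' then ['\\', '\\'] else if c = ',' then ['\\', ','] else [c])
      = (fun c => List.flatMap (fun d => if d = ',' then ['\\', ','] else [d])
          (if c = '\\' then ['\\', '\\'] else [c])) := by
    funext c
    by_cases h1 : c = '\\'
    · simp [h1]
    · by_cases h2 : c = ','
      · simp [h1, h2]
      · simp [h1, h2]
  rw [hfun]
  apply String.toList_injective
  simp
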